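-- pv_equiv track=rewrite | github.com/gaiusm/chisel | python/txt2txt.py | readMap
-- ===== SOURCE A (Python) =====
-- def readMap (i):
--     mapGrid = []
--     inMap = False
--     s = 0
--     for line in i:
--         s += 1
--         c = line.lstrip ()
--         if (len (c) > 0) and (c[0] == '#'):
--             inMap = True
--         if inMap:
--             mapGrid += [c]
--     return mapGrid, s
-- ===== SOURCE B (Python) =====
-- def readMap(i):
--     stripped = [line.lstrip() for line in i]
--     s = len(stripped)
--     for idx, c in enumerate(stripped):
--         if c and c[0] == '#':
--             return stripped[idx:], s
--     return [], s
-- ===== Notes on version B (the rewrite author's own statement) =====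
-- stated objective: alternative
-- what changed: Replaces A's sticky-flag accumulator loop by a collect-then-find-split decomposition: strip all lines first, locate the first '#'-starting line, and return that suffix by slicing.
import Mathlib
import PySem

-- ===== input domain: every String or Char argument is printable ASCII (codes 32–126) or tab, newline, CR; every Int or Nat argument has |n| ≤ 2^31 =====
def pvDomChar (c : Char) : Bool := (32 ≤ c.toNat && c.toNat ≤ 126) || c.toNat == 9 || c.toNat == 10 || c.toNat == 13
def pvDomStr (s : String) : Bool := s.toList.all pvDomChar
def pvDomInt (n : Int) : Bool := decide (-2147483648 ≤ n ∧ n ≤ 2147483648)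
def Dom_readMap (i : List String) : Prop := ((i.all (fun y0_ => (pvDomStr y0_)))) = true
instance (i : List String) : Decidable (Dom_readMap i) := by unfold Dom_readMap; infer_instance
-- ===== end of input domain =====

-- B replaces A's sticky-flag single pass by a collect-then-find-split-then-slice decomposition (alternative, same cost).


-- shared test: '(len(c) > 0) and (c[0] == '#')'
def pvIsHash (c : String) : Bool := (0 < PySem.Str.len c) && (PySem.Str.pyGet? c 0 == some '#')

-- ===== PORT A =====
def readMap (i : List String) : List String × Int :=
  let st := i.foldl
    (fun (st : List String × Bool × Int) line =>
      let c := PySem.Str.lstrip line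
      let inMap := if pvIsHash c then true else st.2.1
      ((if inMap then st.1 ++ [c] else st.1), inMap, st.2.2 + 1))
    ([], false, 0)
  (st.1, st.2.2)

-- ===== PORT B =====
def readMap_alt (i : List String) : List String × Int :=
  let stripped := i.map PySem.Str.lstrip
  let s : Int := stripped.length
  match stripped.findIdx? pvIsHash with
  | some idx => (PySem.List.slice stripped (some (idx : Int)) none, s)
  | none => ([], s)

-- ===== PRECONDITION & SPEC =====
def Spec_readMap (i : List String) (out : List String × Int) : Prop := out = readMap_alt i
instance (i : List String) (out : List String × Int) : Decidable (Spec_readMap i out) := by unfold Spec_readMap; infer_instance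

-- ===== CLAIM (what is proved, stated in full; the proofs are below) =====
def Claim_equal_readMap : Prop := ∀ (i : List String), Dom_readMap i → Spec_readMap i (readMap i)

-- ===== LEMMAS AND PROOFS =====

def pvStep (st : List String × Bool × Int) (line : String) : List String × Bool × Int :=
  let c := PySem.Str.lstrip line
  let inMap := if pvIsHash c then true else st.2.1
  ((if inMap then st.1 ++ [c] else st.1), inMap, st.2.2 + 1)

theorem pvFold_true (l : List String) (g : List String) (s : Int) :
    l.foldl pvStep (g, true, s) = (g ++ l.map PySem.Str.lstrip, true, s + l.length) := by
  induction l generalizing g s with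
  | nil => simp
  | cons a l ih =>
    simp only [List.foldl_cons, pvStep]
    split <;> simp [ih, List.append_assoc] <;> ring_nf

theorem pvFold_false (l : List String) (g : List String) (s : Int) :
    l.foldl pvStep (g, false, s) =
      (g ++ (match (l.map PySem.Str.lstrip).findIdx? pvIsHash with
             | some idx => (l.map PySem.Str.lstrip).drop idx
             | none => []),
       ((l.map PySem.Str.lstrip).findIdx? pvIsHash).isSome,
       s + l.length) := by
  induction l generalizing g s with
  | nil => simp
  | cons a l ih =>
    simp only [List.foldl_cons, pvStep, List.map_cons, List.findIdx?_cons]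
    by_cases h : pvIsHash (PySem.Str.lstrip a)
    · simp only [h, if_true, pvFold_true]
      simp [List.append_assoc]
      ring_nf
    · simp only [h, if_false, Bool.false_eq_true, ih]
      cases hf : (l.map PySem.Str.lstrip).findIdx? pvIsHash <;>
        simp [Option.map_some, Option.map_none] <;> ring_nf

theorem readMap_spec : Claim_equal_readMap := by
  intro i _
  show readMap i = readMap_alt i
  unfold readMap readMap_alt
  have : i.foldl
      (fun (st : List String × Bool × Int) line =>
        let c := PySem.Str.lstrip line
        let inMap := if pvIsHash c then true else st.2.1
        ((if inMap then st.1 ++ [c] else st.1), inMap, st.2.2 + 1)) ([], false, 0)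
      = i.foldl pvStep ([], false, 0) := rfl
  rw [this, pvFold_false]
  cases hf : (i.map PySem.Str.lstrip).findIdx? pvIsHash with
  | none => simp [hf]
  | some idx =>
    simp only [hf, List.nil_append]
    rw [PySem.List.slice_from_natCast]
    simp
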